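-- pv_equiv track=rewrite | github.com/prathambhatia/codeforces | An_odd_meal.py | meals
-- ===== SOURCE A (Python) =====
-- def meals(array):
--     curr_sum = sum(array)
--     n = len(array)
--
--     if curr_sum % 2 != 0:
--         return n
--
--     first_odd_index = -1
--     last_odd_index = -1
--
--     for i in range(n):
--         if array[i] % 2 != 0:
--             if first_odd_index == -1:
--                 first_odd_index = i
--             last_odd_index = i
--
--     if first_odd_index == -1:
--         return -1
--
--     return max(n - first_odd_index - 1, last_odd_index)
-- ===== SOURCE B (Python) =====
-- def meals(array):
--     # Running-parity scans: the longest prefix (resp. suffix) with odd sum is the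
--     # last position at which the cumulative number of odd elements is odd.
--     best = -1
--     parity = False
--     for i, x in enumerate(array):
--         if x % 2 != 0:
--             parity = not parity
--         if parity:
--             best = max(best, i + 1)
--     parity = False
--     for k, x in enumerate(reversed(array)):
--         if x % 2 != 0:
--             parity = not parity
--         if parity:
--             best = max(best, k + 1)
--     return best
-- ===== Notes on version B (the rewrite author's own statement) =====
-- stated objective: alternative
-- what changed: Instead of A's total-sum oddness check plus first/last odd-index bookkeeping and a final max formula, B never computes the sum or any index: it runs two running-parity scans (forward and over the reversed list), toggling a parity bit on each odd element and recording the current prefix/suffix length as a candidate whenever the parity is odd; the answer is the best candidate, -1 if none.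
import Mathlib
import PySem

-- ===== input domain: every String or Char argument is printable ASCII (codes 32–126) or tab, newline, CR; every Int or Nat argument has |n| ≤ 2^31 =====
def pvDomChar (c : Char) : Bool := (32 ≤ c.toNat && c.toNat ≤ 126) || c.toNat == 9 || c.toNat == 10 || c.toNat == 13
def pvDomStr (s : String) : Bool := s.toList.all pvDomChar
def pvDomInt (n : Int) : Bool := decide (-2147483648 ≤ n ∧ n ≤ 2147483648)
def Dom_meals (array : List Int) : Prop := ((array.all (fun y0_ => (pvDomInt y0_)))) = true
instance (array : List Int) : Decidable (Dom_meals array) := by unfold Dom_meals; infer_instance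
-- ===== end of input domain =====

-- B drops A's total-sum check and first/last odd-index bookkeeping: it makes two
-- running-parity scans (forward, and over the reversed list), toggling a parity bit
-- on each odd element and taking the current length as a candidate whenever the
-- parity is odd; alternative decomposition, same O(n) cost.

-- ===== PORT A =====
-- for i in range(n): if array[i] % 2 != 0: (set first if unset; last = i)
def mealsLoop : List Int → Int → Int × Int → Int × Int
  | [], _, st => st
  | x :: xs, i, (f, l) =>
      if PySem.Int.mod x 2 ≠ 0 then
        mealsLoop xs (i + 1) ((if f = -1 then i else f), i)
      else
        mealsLoop xs (i + 1) (f, l)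

def meals (array : List Int) : Int :=
  let curr_sum := array.sum
  let n : Int := array.length
  if PySem.Int.mod curr_sum 2 ≠ 0 then n
  else
    let st := mealsLoop array 0 (-1, -1)
    if st.1 = -1 then -1
    else max (n - st.1 - 1) st.2

-- ===== PORT B =====
-- one running-parity scan: toggle parity on each odd element; whenever the parity
-- is odd, the current prefix length i+1 is a candidate (best = max best (i+1))
def scanBest : List Int → Int → Bool → Int → Int
  | [], _, _, best => best
  | x :: xs, i, parity, best =>
      let parity' := if PySem.Int.mod x 2 ≠ 0 then !parity else parity
      let best' := if parity' then max best (i + 1) else best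
      scanBest xs (i + 1) parity' best'

def meals_alt (array : List Int) : Int :=
  let b1 := scanBest array 0 false (-1)
  scanBest array.reverse 0 false b1

-- ===== PRECONDITION & SPEC =====
def Spec_meals (array : List Int) (out : Int) : Prop := out = meals_alt array
instance (array : List Int) (out : Int) : Decidable (Spec_meals array out) := by unfold Spec_meals; infer_instance

-- ===== CLAIM (what is proved, stated in full; the proofs are below) =====
def Claim_equal_meals : Prop := ∀ (array : List Int), Dom_meals array → Spec_meals array (meals array)

-- ===== LEMMAS AND PROOFS =====

-- parity of the number of odd elements
def oddPar : List Int → Bool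
  | [] => false
  | x :: xs => if PySem.Int.mod x 2 ≠ 0 then !(oddPar xs) else oddPar xs

-- index of the first / last odd element (proof-only characterisations)
def firstOddIdx : List Int → Option Int
  | [] => none
  | x :: xs => if PySem.Int.mod x 2 ≠ 0 then some 0 else (firstOddIdx xs).map (· + 1)

def lastOddIdx : List Int → Option Int
  | [] => none
  | x :: xs =>
      match lastOddIdx xs with
      | some j => some (j + 1)
      | none => if PySem.Int.mod x 2 ≠ 0 then some 0 else none

-- length of the longest prefix whose running parity (starting from `par`) is odd
def bestLen : List Int → Bool → Option Int
  | [], _ => none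
  | x :: xs, par =>
      let par' := if PySem.Int.mod x 2 ≠ 0 then !par else par
      match bestLen xs par' with
      | some m => some (m + 1)
      | none => if par' then some 1 else none

theorem lastOddIdx_nonneg (xs : List Int) (l : Int) (h : lastOddIdx xs = some l) :
    0 ≤ l ∧ l < xs.length := by
  induction xs generalizing l with
  | nil => simp [lastOddIdx] at h
  | cons x t ih =>
    simp only [lastOddIdx] at h
    cases ht : lastOddIdx t with
    | some j =>
      rw [ht] at h; injection h with h
      have := ih j ht
      simp only [List.length_cons]; omega
    | none =>
      rw [ht] at h
      by_cases hodd : PySem.Int.mod x 2 ≠ 0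
      · rw [if_pos hodd] at h; injection h with h
        simp only [List.length_cons]; omega
      · rw [if_neg hodd] at h; cases h

theorem lastOddIdx_none_iff (xs : List Int) :
    lastOddIdx xs = none ↔ ∀ x ∈ xs, PySem.Int.mod x 2 = 0 := by
  induction xs with
  | nil => simp [lastOddIdx]
  | cons x t ih =>
    simp only [lastOddIdx, List.mem_cons]
    cases h : lastOddIdx t with
    | some j =>
      simp only [reduceCtorEq, false_iff]
      intro hc
      have : lastOddIdx t = none := ih.mpr (fun z hz => hc z (Or.inr hz))
      rw [this] at h; cases h
    | none =>
      have hall := ih.mp h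
      by_cases hodd : PySem.Int.mod x 2 ≠ 0
      · rw [if_pos hodd]
        simp only [reduceCtorEq, false_iff]
        intro hc
        exact hodd (hc x (Or.inl rfl))
      · rw [if_neg hodd]
        simp only [true_iff]
        rintro y (rfl | hy)
        · exact not_not.mp hodd
        · exact hall y hy

theorem oddPar_of_lastOddIdx_none (xs : List Int) (h : lastOddIdx xs = none) :
    oddPar xs = false := by
  induction xs with
  | nil => rfl
  | cons x t ih =>
    simp only [lastOddIdx] at h
    cases ht : lastOddIdx t with
    | some j => rw [ht] at h; cases h
    | none =>
      rw [ht] at h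
      by_cases hodd : PySem.Int.mod x 2 ≠ 0
      · rw [if_pos hodd] at h; cases h
      · simp only [oddPar, if_neg hodd]
        exact ih ht

theorem oddPar_of_lastOddIdx_zero (xs : List Int) (h : lastOddIdx xs = some 0) :
    oddPar xs = true := by
  cases xs with
  | nil => simp [lastOddIdx] at h
  | cons x t =>
    simp only [lastOddIdx] at h
    cases ht : lastOddIdx t with
    | some j =>
      rw [ht] at h; injection h with h
      have := lastOddIdx_nonneg t j ht
      omega
    | none =>
      rw [ht] at h
      by_cases hodd : PySem.Int.mod x 2 ≠ 0
      · simp only [oddPar, if_pos hodd, oddPar_of_lastOddIdx_none t ht]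
        rfl
      · rw [if_neg hodd] at h; cases h

theorem firstOddIdx_bounds (xs : List Int) (j : Int) (h : firstOddIdx xs = some j) :
    0 ≤ j ∧ j < xs.length := by
  induction xs generalizing j with
  | nil => simp [firstOddIdx] at h
  | cons x t ih =>
    simp only [firstOddIdx] at h
    by_cases hodd : PySem.Int.mod x 2 ≠ 0
    · rw [if_pos hodd] at h; injection h with h
      simp only [List.length_cons]; omega
    · rw [if_neg hodd] at h
      cases ht : firstOddIdx t with
      | some j' =>
        rw [ht] at h; simp only [Option.map_some] at h; injection h with h
        have := ih j' ht
        simp only [List.length_cons]; omega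
      | none => rw [ht] at h; cases h

theorem firstOddIdx_none_iff (xs : List Int) :
    firstOddIdx xs = none ↔ ∀ x ∈ xs, PySem.Int.mod x 2 = 0 := by
  induction xs with
  | nil => simp [firstOddIdx]
  | cons x t ih =>
    simp only [firstOddIdx, List.mem_cons]
    by_cases hodd : PySem.Int.mod x 2 ≠ 0
    · rw [if_pos hodd]
      simp only [reduceCtorEq, false_iff]
      intro hc
      exact hodd (hc x (Or.inl rfl))
    · rw [if_neg hodd]
      cases ht : firstOddIdx t with
      | some j =>
        simp only [Option.map_some, reduceCtorEq, false_iff]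
        intro hc
        have : firstOddIdx t = none := ih.mpr (fun z hz => hc z (Or.inr hz))
        rw [this] at ht; cases ht
      | none =>
        have hall := ih.mp ht
        simp only [Option.map_none, true_iff]
        rintro y (rfl | hy)
        · exact not_not.mp hodd
        · exact hall y hy

theorem lastOddIdx_append (a b : List Int) :
    lastOddIdx (a ++ b) =
      match lastOddIdx b with
      | some j => some ((a.length : Int) + j)
      | none => lastOddIdx a := by
  induction a with
  | nil => cases hb : lastOddIdx b <;> simp [lastOddIdx, hb]
  | cons x t ih =>
    simp only [List.cons_append, lastOddIdx, ih]
    cases hb : lastOddIdx b with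
    | some j =>
      simp only [List.length_cons]
      push_cast
      ring_nf
    | none => rfl

theorem lastOddIdx_reverse (xs : List Int) :
    lastOddIdx xs.reverse = (firstOddIdx xs).map (fun j => (xs.length : Int) - 1 - j) := by
  induction xs with
  | nil => simp [lastOddIdx, firstOddIdx]
  | cons x t ih =>
    simp only [List.reverse_cons, lastOddIdx_append, firstOddIdx]
    by_cases hodd : PySem.Int.mod x 2 ≠ 0
    · simp only [lastOddIdx, if_pos hodd, Option.map_some, List.length_cons,
        List.length_reverse]
      push_cast; ring_nf
    · simp only [lastOddIdx, if_neg hodd, ih]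
      cases hf : firstOddIdx t with
      | some j => simp only [Option.map_some, List.length_cons]; push_cast; ring_nf
      | none => simp

theorem oddPar_append (a b : List Int) : oddPar (a ++ b) = xor (oddPar a) (oddPar b) := by
  induction a with
  | nil => simp [oddPar]
  | cons x t ih =>
    simp only [List.cons_append, oddPar, ih]
    by_cases hodd : PySem.Int.mod x 2 ≠ 0
    · simp only [if_pos hodd]
      cases oddPar t <;> cases oddPar b <;> rfl
    · simp only [if_neg hodd]

theorem oddPar_reverse (xs : List Int) : oddPar xs.reverse = oddPar xs := by
  induction xs with
  | nil => rfl
  | cons x t ih =>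
    simp only [List.reverse_cons, oddPar_append, ih, oddPar]
    by_cases hodd : PySem.Int.mod x 2 ≠ 0
    · simp only [if_pos hodd]
      cases oddPar t <;> rfl
    · simp only [if_neg hodd]
      cases oddPar t <;> rfl

-- the characterisation of A's loop
theorem mealsLoop_char (xs : List Int) (i f l : Int) (hi : 0 ≤ i) (hf : f = -1 ∨ 0 ≤ f) :
    mealsLoop xs i (f, l) =
      ((if f = -1 then ((firstOddIdx xs).map (i + ·)).getD (-1) else f),
       ((lastOddIdx xs).map (i + ·)).getD l) := by
  induction xs generalizing i f l with
  | nil => simp [mealsLoop, firstOddIdx, lastOddIdx]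
  | cons x t ih =>
    simp only [mealsLoop, firstOddIdx, lastOddIdx]
    by_cases hodd : PySem.Int.mod x 2 ≠ 0
    · rw [if_pos hodd, if_pos hodd,
        ih (i + 1) _ _ (by omega) (by right; split <;> omega)]
      have hne : ¬((if f = -1 then i else f) = -1) := by split <;> omega
      rw [if_neg hne]
      simp only [Prod.mk.injEq]
      refine ⟨?_, ?_⟩
      · by_cases hfe : f = -1
        · simp [hfe]
        · simp [hfe]
      · cases hl : lastOddIdx t with
        | some j =>
          simp only [Option.map_some, Option.getD_some]
          ring_nf
        | none =>
          have hx : x % 2 = 1 := by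
            have h2 := PySem.Int.mod_eq_emod_of_pos (a := x) (b := 2) (by omega)
            have h3 := PySem.Int.mod_two_eq x
            rcases h3 with h3 | h3
            · exact absurd h3 hodd
            · omega
          simp [hx]
    · rw [if_neg hodd, if_neg hodd,
        ih (i + 1) _ _ (by omega) hf]
      simp only [Prod.mk.injEq]
      refine ⟨?_, ?_⟩
      · by_cases hfe : f = -1
        · simp only [if_pos hfe]
          cases hft : firstOddIdx t with
          | some j => simp only [Option.map_some, Option.getD_some]; ring_nf
          | none => simp
        · simp [hfe]
      · cases hl : lastOddIdx t with
        | some j =>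
          simp only [Option.map_some, Option.getD_some]
          ring_nf
        | none =>
          have hx : ¬(x % 2 = 1) := by
            have h2 := PySem.Int.mod_eq_emod_of_pos (a := x) (b := 2) (by omega)
            have h3 := not_not.mp hodd
            omega
          simp [hx]

theorem bestLen_pos (xs : List Int) (par : Bool) (m : Int) (h : bestLen xs par = some m) :
    1 ≤ m := by
  induction xs generalizing par m with
  | nil => simp [bestLen] at h
  | cons x t ih =>
    simp only [bestLen] at h
    cases ht : bestLen t (if PySem.Int.mod x 2 ≠ 0 then !par else par) with
    | some m' => rw [ht] at h; injection h with h; have := ih _ m' ht; omega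
    | none =>
      rw [ht] at h
      by_cases hp : (if PySem.Int.mod x 2 ≠ 0 then !par else par) = true
      · rw [if_pos hp] at h; injection h with h; omega
      · rw [if_neg hp] at h; cases h

-- B's scan computes max best (i + bestLen)
theorem scanBest_char (xs : List Int) (i : Int) (par : Bool) (best : Int) :
    scanBest xs i par best =
      match bestLen xs par with
      | some m => max best (i + m)
      | none => best := by
  induction xs generalizing i par best with
  | nil => simp [scanBest, bestLen]
  | cons x t ih =>
    simp only [scanBest, bestLen]
    rw [ih]
    cases ht : bestLen t (if PySem.Int.mod x 2 ≠ 0 then !par else par) with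
    | some m =>
      have hm := bestLen_pos t _ m ht
      have hmm : i + (m + 1) = i + 1 + m := by ring
      by_cases hp : (if PySem.Int.mod x 2 ≠ 0 then !par else par) = true
      · simp only [if_pos hp]
        rw [hmm, max_assoc, max_eq_right (by omega : i + 1 ≤ i + 1 + m)]
      · simp only [if_neg hp]
        rw [hmm]
    | none =>
      by_cases hp : (if PySem.Int.mod x 2 ≠ 0 then !par else par) = true
      · simp only [if_pos hp]
      · simp only [if_neg hp]

-- the key characterisation of bestLen
theorem bestLen_char (xs : List Int) (par : Bool) :
    bestLen xs par =
      if par ≠ oddPar xs then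
        (if xs.length = 0 then none else some (xs.length : Int))
      else
        match lastOddIdx xs with
        | some l => if l = 0 then none else some l
        | none => none := by
  induction xs generalizing par with
  | nil =>
    simp only [bestLen, List.length_nil, if_pos rfl, lastOddIdx, oddPar]
    cases par <;> simp
  | cons x t ih =>
    simp only [bestLen, oddPar, lastOddIdx, ih]
    set par' := if PySem.Int.mod x 2 ≠ 0 then !par else par with hpar'
    have hxor : (par ≠ (if PySem.Int.mod x 2 ≠ 0 then !(oddPar t) else oddPar t)) ↔
        (par' ≠ oddPar t) := by
      by_cases hodd : PySem.Int.mod x 2 ≠ 0 <;>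
        cases par <;> cases hpt : oddPar t <;> simp [hpar', hodd, hpt]
    by_cases hflag : par' ≠ oddPar t
    · rw [if_pos hflag, if_pos (hxor.mpr hflag)]
      cases t with
      | nil =>
        simp only [List.length_nil, if_pos rfl, List.length_cons]
        have hpt : par' = true := by
          have h0 : oddPar ([] : List Int) = false := rfl
          rw [h0] at hflag
          cases hp : par'
          · rw [hp] at hflag; exact absurd rfl hflag
          · rfl
        simp [hpt]
      | cons y u =>
        have hne : (y :: u).length ≠ 0 := by simp
        rw [if_neg hne]
        have hne2 : (x :: y :: u).length ≠ 0 := by simp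
        rw [if_neg hne2]
        simp only [List.length_cons]
        push_cast; ring_nf
    · rw [if_neg hflag, if_neg (fun h => hflag (hxor.mp h))]
      push_neg at hflag
      cases hl : lastOddIdx t with
      | some l =>
        have hlb := lastOddIdx_nonneg t l hl
        by_cases hl0 : l = 0
        · subst hl0
          have hpt : oddPar t = true := oddPar_of_lastOddIdx_zero t hl
          rw [hpt] at hflag
          have h01 : ¬((0:Int) + 1 = 0) := by omega
          simp [hflag, h01]
        · have h1 : ¬(l + 1 = 0) := by omega
          simp [hl0, h1]
      | none =>
        have hpt : oddPar t = false := oddPar_of_lastOddIdx_none t hl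
        rw [hpt] at hflag
        by_cases hodd : PySem.Int.mod x 2 ≠ 0
        · have hx : x % 2 = 1 := by
            have h2 := PySem.Int.mod_eq_emod_of_pos (a := x) (b := 2) (by omega)
            have h3 := PySem.Int.mod_two_eq x
            rcases h3 with h3 | h3
            · exact absurd h3 hodd
            · omega
          simp [hx, hflag]
        · have hx : ¬(x % 2 = 1) := by
            have h2 := PySem.Int.mod_eq_emod_of_pos (a := x) (b := 2) (by omega)
            have h3 := not_not.mp hodd
            omega
          simp [hx, hflag]

-- sum parity = odd-count parity
theorem sum_mod_two (xs : List Int) :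
    PySem.Int.mod xs.sum 2 = if oddPar xs then 1 else 0 := by
  have hm : ∀ z : Int, PySem.Int.mod z 2 = z % 2 :=
    fun z => PySem.Int.mod_eq_emod_of_pos (by omega)
  induction xs with
  | nil => simp [oddPar, hm]
  | cons x t ih =>
    rw [hm] at ih ⊢
    simp only [List.sum_cons]
    have hsplit : oddPar (x :: t) =
        if PySem.Int.mod x 2 ≠ 0 then !(oddPar t) else oddPar t := rfl
    rw [hsplit]
    by_cases hodd : PySem.Int.mod x 2 ≠ 0
    · rw [if_pos hodd]
      have hx : x % 2 = 1 := by
        rcases PySem.Int.mod_two_eq x with h3 | h3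
        · exact absurd h3 hodd
        · have h2 := hm x; omega
      cases hpt : oddPar t <;> rw [hpt] at ih <;> simp at ih ⊢ <;> omega
    · rw [if_neg hodd]
      have hx : x % 2 = 0 := by
        have h2 := hm x
        have h3 := not_not.mp hodd
        omega
      cases hpt : oddPar t <;> rw [hpt] at ih <;> simp at ih ⊢ <;> omega

-- ===== VERDICT (by name: the statement is the Claim_ definition above) =====
theorem meals_spec : Claim_equal_meals := by
  intro array _
  unfold Spec_meals meals meals_alt
  simp only [scanBest_char, bestLen_char, oddPar_reverse, lastOddIdx_reverse,
    sum_mod_two, List.length_reverse]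
  by_cases htot : oddPar array = true
  · -- total sum odd: A returns n; both B scans take the flagged branch
    have hne : array.length ≠ 0 := by
      intro h0
      have : array = [] := List.length_eq_zero_iff.mp h0
      subst this
      exact absurd htot (by simp [oddPar])
    rw [htot]
    simp [hne]
  · have htot' : oddPar array = false := by
      cases h : oddPar array
      · rfl
      · exact absurd h htot
    rw [htot']
    have c1 : ¬((if (false = true) then (1:Int) else 0) ≠ 0) := by simp
    rw [if_neg c1]
    have c2 : ¬((false : Bool) ≠ false) := by simp
    rw [if_neg c2, if_neg c2]
    rw [mealsLoop_char array 0 (-1) (-1) le_rfl (Or.inl rfl)]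
    cases hf : firstOddIdx array with
    | none =>
      have hl : lastOddIdx array = none := by
        rw [lastOddIdx_none_iff]
        exact (firstOddIdx_none_iff array).mp hf
      simp [hl, hf]
    | some f =>
      have hfb := firstOddIdx_bounds array f hf
      cases hl : lastOddIdx array with
      | none =>
        exfalso
        have h1 := (lastOddIdx_none_iff array).mp hl
        have h2 : firstOddIdx array = none := (firstOddIdx_none_iff array).mpr h1
        rw [h2] at hf; cases hf
      | some l =>
        have hlb := lastOddIdx_nonneg array l hl
        have hl1 : l ≠ 0 := by
          intro h0; subst h0
          have := oddPar_of_lastOddIdx_zero array hl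
          rw [this] at htot'; cases htot'
        have hrev1 : (array.length : Int) - 1 - f ≠ 0 := by
          intro h0
          have hrl : lastOddIdx array.reverse = some 0 := by
            rw [lastOddIdx_reverse, hf, Option.map_some, h0]
          have := oddPar_of_lastOddIdx_zero array.reverse hrl
          rw [oddPar_reverse, htot'] at this; cases this
        simp only [hf, hl, Option.map_some, Option.getD_some, if_true]
        rw [if_neg hl1, if_neg hrev1]
        rw [if_neg (by omega : ¬((0:Int) + f = -1))]
        show _ = max (max (-1) (0 + l)) (0 + ((array.length : Int) - 1 - f))
        rw [max_eq_right (by omega : (-1:Int) ≤ 0 + l), max_comm]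
        congr 1 <;> ring
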